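-- pv_equiv track=rewrite | github.com/leemnj/bioinfo-algorithm | chapter_04/bioinfo_4i.py | trim_leaderboard
-- ===== SOURCE A (Python) =====
-- from collections import Counter
--
-- def get_linear_spectrum(peptide):
--     """펩타이드(리스트)로부터 선형 스펙트럼 생성"""
--     prefix_mass = [0]
--     for mass in peptide:
--         prefix_mass.append(prefix_mass[-1] + mass)
--
--     linear_spectrum = [0]
--     for i in range(len(peptide)):
--         for j in range(i + 1, len(peptide) + 1):
--             linear_spectrum.append(prefix_mass[j] - prefix_mass[i])
--     return sorted(linear_spectrum)
--
-- def score_linear(peptide, spectrum_counter):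
--     """선형 점수 계산 (가지치기용)"""
--     pep_spec = get_linear_spectrum(peptide)
--     pep_counter = Counter(pep_spec)
--
--     score = 0
--     for mass, count in pep_counter.items():
--         if mass in spectrum_counter:
--             score += min(count, spectrum_counter[mass])
--     return score
--
-- def trim_leaderboard(leaderboard, spectrum_counter, N):
--     """
--     Leaderboard 자르기 (Linear Score 기준 상위 N개)
--     """
--     if len(leaderboard) <= N:
--         return leaderboard
--
--     # (점수, 펩타이드) 형태로 변환 후 점수 내림차순 정렬
--     scored_peptides = []
--     for p in leaderboard:
--         s = score_linear(p, spectrum_counter)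
--         scored_peptides.append((s, p))
--
--     scored_peptides.sort(key=lambda x: x[0], reverse=True)
--
--     # N번째 점수(커트라인) 찾기
--     threshold_score = scored_peptides[N-1][0]
--
--     # 커트라인 이상인 펩타이드만 살림
--     return [p for s, p in scored_peptides if s >= threshold_score]
-- ===== SOURCE B (Python) =====
-- def get_linear_spectrum(peptide):
--     """Linear spectrum by summing each fragment slice directly (no prefix-mass table)."""
--     spectrum = [0]
--     for i in range(len(peptide)):
--         for j in range(i, len(peptide)):
--             spectrum.append(sum(peptide[i:j + 1]))
--     return sorted(spectrum)
--
-- def score_linear(peptide, spectrum_counter):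
--     """Score over the distinct masses of the spectrum, counting each by a scan."""
--     spec = get_linear_spectrum(peptide)
--     score = 0
--     for mass in dict.fromkeys(spec):
--         if mass in spectrum_counter:
--             score += min(spec.count(mass), spectrum_counter[mass])
--     return score
--
-- def trim_leaderboard(leaderboard, spectrum_counter, N):
--     if len(leaderboard) <= N:
--         return leaderboard
--     scores = [score_linear(p, spectrum_counter) for p in leaderboard]
--     threshold = sorted(scores, reverse=True)[N - 1]
--     buckets = {}
--     for s, p in zip(scores, leaderboard):
--         buckets.setdefault(s, []).append(p)
--     result = []
--     for s in sorted(buckets, reverse=True):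
--         if s >= threshold:
--             result.extend(buckets[s])
--     return result
-- ===== Notes on version B (the rewrite author's own statement) =====
-- stated objective: alternative
-- what changed: B computes each spectrum mass by summing the fragment slice directly instead of differencing a prefix-mass table, scores by iterating the distinct masses (dict.fromkeys) with count scans instead of building a Counter, and trims by grouping peptides into score buckets emitted in descending score order instead of stably sorting (score, peptide) pairs and filtering.
import Mathlib
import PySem

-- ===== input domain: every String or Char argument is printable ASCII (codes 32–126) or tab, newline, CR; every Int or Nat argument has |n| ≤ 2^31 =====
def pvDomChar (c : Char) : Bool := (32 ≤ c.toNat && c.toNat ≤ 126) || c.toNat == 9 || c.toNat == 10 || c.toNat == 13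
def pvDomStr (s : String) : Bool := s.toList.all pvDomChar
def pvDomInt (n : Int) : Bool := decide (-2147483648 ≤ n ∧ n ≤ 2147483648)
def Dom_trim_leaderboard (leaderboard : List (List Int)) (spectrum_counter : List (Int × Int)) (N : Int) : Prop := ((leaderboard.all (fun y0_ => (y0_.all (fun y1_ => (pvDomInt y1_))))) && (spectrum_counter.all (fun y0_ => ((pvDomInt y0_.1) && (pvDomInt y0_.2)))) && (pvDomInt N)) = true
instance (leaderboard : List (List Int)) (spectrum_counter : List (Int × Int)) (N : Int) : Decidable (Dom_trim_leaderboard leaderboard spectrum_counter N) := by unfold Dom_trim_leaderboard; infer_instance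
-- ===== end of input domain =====

-- B computes each spectrum mass by summing the fragment slice directly (no prefix-mass table),
-- scores over the distinct spectrum masses via dict.fromkeys + count scans (no Counter), and trims
-- by grouping peptides into score buckets emitted in descending score order (no stable sort of
-- (score, peptide) pairs); objective: alternative decomposition, same results.

-- ===== PORT A =====
def pvGetLinearSpectrum (peptide : List Int) : List Int :=
  let prefix_mass := peptide.foldl (fun pm mass => pm ++ [PySem.List.pyGetD pm (-1) 0 + mass]) [0]
  let linear_spectrum := (PySem.List.pyRange 0 peptide.length).foldl (fun acc i =>
      (PySem.List.pyRange (i + 1) ((peptide.length : Int) + 1)).foldl (fun acc2 j =>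
        acc2 ++ [PySem.List.pyGetD prefix_mass j 0 - PySem.List.pyGetD prefix_mass i 0]) acc) [0]
  PySem.List.sorted linear_spectrum (fun x => x) false

def pvScoreLinear (peptide : List Int) (spectrum_counter : List (Int × Int)) : Int :=
  let pep_spec := pvGetLinearSpectrum peptide
  let pep_counter := PySem.Dict.counter pep_spec
  pep_counter.items.foldl (fun score mc =>
    if (PySem.Dict.mk spectrum_counter).contains mc.1 then
      score + min mc.2 ((PySem.Dict.mk spectrum_counter).getD mc.1 0)
    else score) 0

def trim_leaderboard (leaderboard : List (List Int)) (spectrum_counter : List (Int × Int)) (N : Int) : List (List Int) :=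
  if (leaderboard.length : Int) ≤ N then leaderboard else
    let scored_peptides := leaderboard.foldl (fun acc p => acc ++ [(pvScoreLinear p spectrum_counter, p)]) []
    let sortedPairs := PySem.List.sorted scored_peptides (fun x => x.1) true
    let threshold := (PySem.List.pyGetD sortedPairs (N - 1) (0, [])).1
    sortedPairs.foldl (fun acc sp => if threshold ≤ sp.1 then acc ++ [sp.2] else acc) []

-- ===== PORT B =====
def pvGetLinearSpectrumAlt (peptide : List Int) : List Int :=
  let spectrum := (PySem.List.pyRange 0 peptide.length).foldl (fun acc i =>
      (PySem.List.pyRange i peptide.length).foldl (fun acc2 j =>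
        acc2 ++ [(PySem.List.slice peptide (some i) (some (j + 1))).sum]) acc) [0]
  PySem.List.sorted spectrum (fun x => x) false

def pvScoreLinearAlt (peptide : List Int) (spectrum_counter : List (Int × Int)) : Int :=
  let spec := pvGetLinearSpectrumAlt peptide
  (PySem.List.dedup spec).foldl (fun score mass =>
    if (PySem.Dict.mk spectrum_counter).contains mass then
      score + min ((List.count mass spec : Nat) : Int) ((PySem.Dict.mk spectrum_counter).getD mass 0)
    else score) 0

def trim_leaderboard_alt (leaderboard : List (List Int)) (spectrum_counter : List (Int × Int)) (N : Int) : List (List Int) :=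
  if (leaderboard.length : Int) ≤ N then leaderboard else
    let scores := leaderboard.map (fun p => pvScoreLinearAlt p spectrum_counter)
    let threshold := PySem.List.pyGetD (PySem.List.sorted scores (fun s => s) true) (N - 1) 0
    let buckets := (scores.zip leaderboard).foldl
      (fun d sp => d.modify sp.1 [] (fun l => l ++ [sp.2])) (PySem.Dict.empty : PySem.Dict Int (List (List Int)))
    (PySem.List.sorted buckets.keys (fun s => s) true).foldl (fun acc s =>
      if threshold ≤ s then acc ++ buckets.getD s [] else acc) []

-- ===== PRECONDITION & SPEC =====
-- Pre_ excludes exactly the inputs where the Python A raises IndexError (len(leaderboard) > N with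
-- scored_peptides[N-1] out of range, i.e. N ≤ -len(leaderboard)); the Python B raises there too.
def Pre_trim_leaderboard (leaderboard : List (List Int)) (spectrum_counter : List (Int × Int)) (N : Int) : Prop :=
  (leaderboard.length : Int) ≤ N ∨ 1 - (leaderboard.length : Int) ≤ N
instance (leaderboard : List (List Int)) (spectrum_counter : List (Int × Int)) (N : Int) : Decidable (Pre_trim_leaderboard leaderboard spectrum_counter N) := by unfold Pre_trim_leaderboard; infer_instance

def pvWitness_trim_leaderboard : List (List Int) × (List (Int × Int)) × Int := ([[57, 71], [57]], [(57, 2), (128, 1)], 1)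

def Spec_trim_leaderboard (leaderboard : List (List Int)) (spectrum_counter : List (Int × Int)) (N : Int) (out : List (List Int)) : Prop := out = trim_leaderboard_alt leaderboard spectrum_counter N
instance (leaderboard : List (List Int)) (spectrum_counter : List (Int × Int)) (N : Int) (out : List (List Int)) : Decidable (Spec_trim_leaderboard leaderboard spectrum_counter N out) := by unfold Spec_trim_leaderboard; infer_instance

-- ===== CLAIM (what is proved, stated in full; the proofs are below) =====
def Claim_equal_trim_leaderboard : Prop := ∀ (leaderboard : List (List Int)) (spectrum_counter : List (Int × Int)) (N : Int), Dom_trim_leaderboard leaderboard spectrum_counter N → Pre_trim_leaderboard leaderboard spectrum_counter N → Spec_trim_leaderboard leaderboard spectrum_counter N (trim_leaderboard leaderboard spectrum_counter N)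

-- ===== LEMMAS AND PROOFS =====

-- A's prefix_mass list is the list of prefix sums of the peptide
theorem pvPrefixMass_eq (peptide : List Int) :
    peptide.foldl (fun pm mass => pm ++ [PySem.List.pyGetD pm (-1) 0 + mass]) [0]
      = (List.range (peptide.length + 1)).map (fun k => ((peptide.take k).sum : Int)) := by
  induction peptide using List.reverseRecOn with
  | nil => simp
  | append_singleton ys x ih =>
    rw [List.foldl_append, ih]
    have hsplit : (List.range (ys.length + 1)).map (fun k => ((ys.take k).sum : Int))
        = (List.range ys.length).map (fun k => ((ys.take k).sum : Int)) ++ [ys.sum] := by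
      rw [List.range_succ]; simp
    rw [List.foldl_cons, List.foldl_nil, hsplit]
    have hget : PySem.List.pyGetD ((List.range ys.length).map (fun k => ((ys.take k).sum : Int)) ++ [ys.sum]) (-1) 0 = ys.sum := by
      simp [PySem.List.pyGetD, PySem.List.pyGet?, PySem.List.pyIdx?]
    rw [hget]
    have hlen : (ys ++ [x]).length + 1 = (ys.length + 1) + 1 := by simp
    rw [hlen, List.range_succ, List.map_append, List.range_succ, List.map_append]
    congr 1
    · congr 1
      · apply List.map_congr_left
        intro k hk
        rw [List.mem_range] at hk
        rw [List.take_append_of_le_length (by omega)]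
      · simp [List.take_append_of_le_length (le_refl ys.length), List.take_length]
    · simp

-- a unit-step range is a shifted List.range
theorem pyRange_one_eq (a b : Int) :
    PySem.List.pyRange a b = (List.range (b - a).toNat).map (fun (k : Nat) => a + (k : Int)) := by
  unfold PySem.List.pyRange
  simp only [if_neg (by norm_num : (1:Int) ≠ 0), if_pos (by norm_num : (0:Int) < 1)]
  by_cases h : a < b
  · rw [if_pos h]
    have : b - a + 1 - 1 = b - a := by ring
    rw [this, Int.ediv_one]
    apply List.map_congr_left; intro k _; ring
  · rw [if_neg h]
    have : (b - a).toNat = 0 := by omega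
    simp [this]

-- the two unsorted spectra coincide fragment by fragment, hence the spectra are equal
theorem pvSpectrum_eq (peptide : List Int) :
    pvGetLinearSpectrumAlt peptide = pvGetLinearSpectrum peptide := by
  unfold pvGetLinearSpectrum pvGetLinearSpectrumAlt
  rw [pvPrefixMass_eq]
  simp only [PySem.List.foldl_append_singleton_eq_map, PySem.List.foldl_append_eq_flatMap]
  congr 1
  congr 1
  apply List.flatMap_congr
  intro i hi
  rw [pyRange_one_eq] at hi
  simp only [List.mem_map, List.mem_range] at hi
  obtain ⟨a, ha, rfl⟩ := hi
  simp only [Int.zero_add]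
  rw [pyRange_one_eq, pyRange_one_eq, List.map_map, List.map_map]
  have hc : ((peptide.length : Int) + 1 - ((a : Int) + 1)).toNat = ((peptide.length : Int) - (a : Int)).toNat := by omega
  rw [hc]
  apply List.map_congr_left
  intro k hk
  rw [List.mem_range] at hk
  have ha' : a < peptide.length := by omega
  have hk' : a + k < peptide.length := by omega
  simp only [Function.comp]
  have e1 : (a : Int) + (k : Int) + 1 = ((a + k + 1 : Nat) : Int) := by push_cast; ring
  have e2 : (a : Int) + 1 + (k : Int) = ((a + 1 + k : Nat) : Int) := by push_cast; ring
  rw [e1, e2, PySem.List.slice_natCast, PySem.List.pyGetD_natCast]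
  have e0 : (a : Int) = ((a : Nat) : Int) := rfl
  rw [e0, PySem.List.pyGetD_natCast]
  rw [PySem.List.getD_map_range _ _ _ _ (by omega), PySem.List.getD_map_range _ _ _ _ (by omega)]
  have : a + 1 + k = a + (k + 1) := by omega
  rw [this, List.take_add, List.sum_append]
  have : a + k + 1 - a = k + 1 := by omega
  rw [this]
  ring

-- the two scoring loops coincide: Counter items are exactly the distinct masses with their counts
theorem pvScore_eq (peptide : List Int) (sc : List (Int × Int)) :
    pvScoreLinearAlt peptide sc = pvScoreLinear peptide sc := by
  unfold pvScoreLinearAlt pvScoreLinear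
  rw [pvSpectrum_eq]
  simp only [PySem.Dict.items_counter, List.foldl_map, PySem.List.dedup_eq_ofList]

-- mapping the key over an insertion step inserts the key
theorem map_key_insertBy {α : Type} (key : α → Int) (x : α) (l : List α) :
    (PySem.List.insertBy (fun a b => decide (key b < key a)) x l).map key
      = PySem.List.insertBy (fun a b => decide (b < a)) (key x) (l.map key) := by
  induction l with
  | nil => simp [PySem.List.insertBy]
  | cons y ys ih =>
    simp only [PySem.List.insertBy, List.map_cons]
    by_cases h : key y < key x
    · simp [h]
    · simp [h, ih]

-- mapping the key over a stable descending sort sorts the keys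
theorem map_key_sorted {α : Type} (xs : List α) (key : α → Int) :
    (PySem.List.sorted xs key true).map key = PySem.List.sorted (xs.map key) (fun s => s) true := by
  rw [PySem.List.sorted_rev_eq_foldl_insertBy, PySem.List.sorted_rev_eq_foldl_insertBy]
  suffices h : ∀ (acc : List α), (xs.foldl (fun acc x => PySem.List.insertBy (fun a b => decide (key b < key a)) x acc) acc).map key
      = (xs.map key).foldl (fun acc s => PySem.List.insertBy (fun a b => decide (b < a)) s acc) (acc.map key) by
    simpa using h []
  induction xs with
  | nil => intro acc; rfl
  | cons y ys ih =>
    intro acc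
    simp only [List.foldl_cons, List.map_cons, ih, map_key_insertBy]

-- insertBy walks past a block it does not precede
theorem insertBy_append_not {α : Type} (before : α → α → Bool) (x : α) (l1 l2 : List α)
    (h : ∀ y ∈ l1, before x y = false) :
    PySem.List.insertBy before x (l1 ++ l2) = l1 ++ PySem.List.insertBy before x l2 := by
  induction l1 with
  | nil => rfl
  | cons y ys ih =>
    simp only [List.cons_append, PySem.List.insertBy]
    rw [h y (by simp)]
    simp only [Bool.false_eq_true, if_false]
    rw [ih (fun z hz => h z (by simp [hz]))]

-- inserting an element whose key is already listed extends exactly its own group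
theorem insertBy_groups {α : Type} (key : α → Int) (x : α) (D : List Int) (xs : List α)
    (hD : D.Pairwise (fun a b => b < a)) (hk : key x ∈ D) :
    PySem.List.insertBy (fun a b => decide (key b < key a)) x
        (D.flatMap (fun s => xs.filter (fun y => key y == s)))
      = D.flatMap (fun s => (xs ++ [x]).filter (fun y => key y == s)) := by
  induction D with
  | nil => cases hk
  | cons s D' ih =>
    rw [List.pairwise_cons] at hD
    obtain ⟨hlt, hD'⟩ := hD
    simp only [List.flatMap_cons]
    by_cases hks : key x = s
    · -- x joins the group of s; every later group has a smaller key
      rw [insertBy_append_not _ _ _ _ (by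
        intro y hy
        rw [List.mem_filter] at hy
        have : key y = s := by simpa using hy.2
        simp [this, hks])]
      have hgroup : ∀ s' ∈ D', (xs ++ [x]).filter (fun y => key y == s') = xs.filter (fun y => key y == s') := by
        intro s' hs'
        rw [List.filter_append]
        have : key x ≠ s' := by have := hlt s' hs'; omega
        simp [this]
      have hrest : PySem.List.insertBy (fun a b => decide (key b < key a)) x
          (D'.flatMap (fun s => xs.filter (fun y => key y == s)))
          = x :: D'.flatMap (fun s => xs.filter (fun y => key y == s)) := by
        cases hflat : D'.flatMap (fun s => xs.filter (fun y => key y == s)) with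
        | nil => simp [PySem.List.insertBy]
        | cons z zs =>
          have hz : z ∈ D'.flatMap (fun s => xs.filter (fun y => key y == s)) := by rw [hflat]; simp
          rw [List.mem_flatMap] at hz
          obtain ⟨s', hs', hzf⟩ := hz
          rw [List.mem_filter] at hzf
          have hkz : key z = s' := by simpa using hzf.2
          have : key z < key x := by have := hlt s' hs'; omega
          simp [PySem.List.insertBy, this]
      rw [hrest]
      rw [List.flatMap_congr (fun s' hs' => hgroup s' hs')]
      rw [List.filter_append]
      simp [hks]
    · -- x belongs to a later group and walks past the group of s
      have hk' : key x ∈ D' := by cases hk with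
        | head => exact absurd rfl hks
        | tail _ h => exact h
      rw [insertBy_append_not _ _ _ _ (by
        intro y hy
        rw [List.mem_filter] at hy
        have hys : key y = s := by simpa using hy.2
        have : key x < s := hlt _ hk'
        simp [hys]; omega)]
      rw [ih hD' hk']
      rw [List.filter_append]
      have : key x ≠ s := hks
      simp [this]

-- a stable descending sort is the concatenation of its key groups, over any strictly
-- descending list D covering all keys
theorem sorted_rev_groups {α : Type} (xs : List α) (key : α → Int) (D : List Int)
    (hD : D.Pairwise (fun a b => b < a)) (hmem : ∀ y ∈ xs, key y ∈ D) :
    PySem.List.sorted xs key true = D.flatMap (fun s => xs.filter (fun y => key y == s)) := by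
  induction xs using List.reverseRecOn with
  | nil => simp [PySem.List.sorted]
  | append_singleton ys x ih =>
    rw [PySem.List.sorted_rev_eq_foldl_insertBy, List.foldl_append, List.foldl_cons, List.foldl_nil,
      ← PySem.List.sorted_rev_eq_foldl_insertBy]
    rw [ih (fun y hy => hmem y (by simp [hy]))]
    exact insertBy_groups key x D ys hD (hmem x (by simp))

-- ===== VERDICT (by name: the statement is the Claim_ definition above) =====
theorem trim_leaderboard_spec : Claim_equal_trim_leaderboard := by
  intro lb sc N _ _
  unfold Spec_trim_leaderboard trim_leaderboard trim_leaderboard_alt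
  by_cases hN : (lb.length : Int) ≤ N
  · simp [hN]
  · simp only [if_neg hN]
    -- the list of (score, peptide) pairs, shared by both sides
    set P : List (Int × List Int) := lb.map (fun p => (pvScoreLinear p sc, p)) with hP
    have hscored : lb.foldl (fun acc p => acc ++ [(pvScoreLinear p sc, p)]) [] = P := by
      rw [PySem.List.foldl_append_singleton_eq_map]; simpa using hP.symm
    have hscores : lb.map (fun p => pvScoreLinearAlt p sc) = P.map (fun sp => sp.1) := by
      rw [hP, List.map_map]
      exact List.map_congr_left fun p _ => pvScore_eq p sc
    have hzipgen : ∀ {β : Type} (l : List (List Int)) (f : List Int → β), (l.map f).zip l = l.map (fun x => (f x, x)) := by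
      intro β l f
      induction l with
      | nil => rfl
      | cons y ys ih => simp [ih]
    have hzip : (P.map (fun sp => sp.1)).zip lb = P := by
      rw [hP, List.map_map, hzipgen]
      simp [Function.comp]
    -- the descending list of distinct scores
    set D0 : List Int := PySem.List.sorted (PySem.Set.ofList (P.map (fun sp => sp.1))) (fun s => s) true with hD0
    have hD0nodup : D0.Nodup :=
      (PySem.List.sorted_perm (PySem.Set.ofList (P.map (fun sp => sp.1))) (fun s => s) true).symm.nodup
        (PySem.Set.nodup_ofList _)
    have hD0desc : D0.Pairwise (fun a b => b < a) := by
      have h1 := PySem.List.sorted_pairwise_rev (PySem.Set.ofList (P.map (fun sp => sp.1))) (fun s => s)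
      exact (h1.and hD0nodup).imp fun h => lt_of_le_of_ne h.1 h.2.symm
    have hmem : ∀ y ∈ P, y.1 ∈ D0 := by
      intro y hy
      rw [hD0, PySem.List.mem_sorted, PySem.Set.mem_ofList]
      exact List.mem_map_of_mem hy
    have hgroups := sorted_rev_groups P (fun sp => sp.1) D0 hD0desc hmem
    -- the two thresholds agree (the sorted scores are the keys of the sorted pairs)
    have hthr : PySem.List.pyGetD (PySem.List.sorted (P.map (fun sp => sp.1)) (fun s => s) true) (N - 1) 0
        = (PySem.List.pyGetD (PySem.List.sorted P (fun sp => sp.1) true) (N - 1) ((0 : Int), ([] : List Int))).1 := by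
      rw [← map_key_sorted]
      exact PySem.List.pyGetD_map (fun sp => sp.1) _ (N - 1) ((0 : Int), ([] : List Int))
    set t : Int := (PySem.List.pyGetD (PySem.List.sorted P (fun sp => sp.1) true) (N - 1) ((0 : Int), ([] : List Int))).1 with ht
    -- bucket contents
    have hbucket : ∀ s : Int,
        ((P.foldl (fun d sp => d.modify sp.1 [] (fun l => l ++ [sp.2]))
            (PySem.Dict.empty : PySem.Dict Int (List (List Int)))).getD s [])
          = (P.filter (fun y => y.1 == s)).map (fun sp => sp.2) := by
      intro s
      rw [PySem.Dict.getD_foldl_modify_append]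
      rfl
    -- bucket keys
    have hkeys : (P.foldl (fun d sp => d.modify sp.1 [] (fun l => l ++ [sp.2]))
          (PySem.Dict.empty : PySem.Dict Int (List (List Int)))).keys
        = PySem.Set.ofList (P.map (fun sp => sp.1)) := by
      rw [PySem.Dict.keys_foldl_modify_key P (fun sp => sp.1) [] (fun _ sp => fun l => l ++ [sp.2])]
      rfl
    simp only [hscored, hscores, hzip, hkeys, hthr, ← hD0, ← ht]
    -- A's output loop is filter-then-map over the grouped sort
    have hbodyA : (fun (acc : List (List Int)) (sp : Int × List Int) => if t ≤ sp.1 then acc ++ [sp.2] else acc)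
        = (fun acc sp => if (decide (t ≤ sp.1)) = true then acc ++ [sp.2] else acc) := by
      funext acc sp; simp
    rw [hbodyA, PySem.List.foldl_append_if, hgroups, List.nil_append, List.filter_flatMap, List.map_flatMap]
    -- B's output loop is a flatMap over the distinct scores
    have hbodyB : (fun (acc : List (List Int)) (s : Int) =>
          if t ≤ s then acc ++ (P.filter (fun y => y.1 == s)).map (fun sp => sp.2) else acc)
        = (fun acc s => acc ++ (if t ≤ s then (P.filter (fun y => y.1 == s)).map (fun sp => sp.2) else [])) := by
      funext acc s; by_cases h : t ≤ s <;> simp [h]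
    simp only [hbucket]
    rw [hbodyB, PySem.List.foldl_append_eq_flatMap, List.nil_append]
    apply List.flatMap_congr
    intro s _
    by_cases hts : t ≤ s
    · rw [if_pos hts]
      congr 1
      rw [List.filter_filter]
      apply List.filter_congr
      intro a _
      by_cases ha : a.1 = s
      · simp [ha, hts]
      · simp [ha]
    · rw [if_neg hts]
      rw [List.filter_filter]
      have : ∀ a ∈ P, (decide (t ≤ a.1) && (a.1 == s)) = false := by
        intro a _
        by_cases ha : a.1 = s
        · simp [ha, hts]
        · simp [ha]
      rw [List.filter_congr this]
      simp
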